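-- pv_equiv track=rewrite | github.com/henryfinnila/PromptGPT | APITesting/testsuite.py | compute_max_chain_length
-- ===== SOURCE A (Python) =====
-- from functools import lru_cache
--
-- def compute_max_chain_length(dominoes):
--     """
--     Uses backtracking with memoization to determine the maximum number of dominoes that can be
--     used in a valid chain given the input dominoes. Domino pieces may be flipped.
--     """
--     n = len(dominoes)
--
--     @lru_cache(maxsize=None)
--     def dfs(current, used):
--         best = 0
--         for i in range(n):
--             # Check if domino i has not been used.
--             if not (used & (1 << i)):
--                 a, b = dominoes[i]
--                 # Option 1: use domino as given if a matches the current chain end (or if starting fresh).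
--                 if current is None or a == current:
--                     best = max(best, 1 + dfs(b, used | (1 << i)))
--                 # Option 2: flip the domino if b matches the current chain end.
--                 if current is None or b == current:
--                     # Only consider the flip separately if a and b are different to avoid duplicate work.
--                     if a != b:
--                         best = max(best, 1 + dfs(a, used | (1 << i)))
--         return best
--
--     return dfs(None, 0)
-- ===== SOURCE B (Python) =====
-- def compute_max_chain_length(dominoes):
--     """Bottom-up BFS over (used_mask, exposed_end) states instead of
--     memoized backtracking: the frontier at step k holds every state of a
--     valid k-domino chain; the answer is the last k with a non-empty frontier."""
--     n = len(dominoes)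
--     frontier = set()
--     for i in range(n):
--         a, b = dominoes[i]
--         frontier.add((1 << i, b))
--         frontier.add((1 << i, a))
--     best = 0
--     k = 1
--     while frontier:
--         best = k
--         nxt = set()
--         for mask, end in frontier:
--             for j in range(n):
--                 if not (mask & (1 << j)):
--                     a, b = dominoes[j]
--                     if a == end:
--                         nxt.add((mask | (1 << j), b))
--                     if b == end:
--                         nxt.add((mask | (1 << j), a))
--         frontier = nxt
--         k += 1
--     return best
-- ===== Notes on version B (the rewrite author's own statement) =====
-- stated objective: alternative
-- what changed: Replaces A's top-down memoized backtracking (dfs over (current end, used mask)) with an iterative bottom-up BFS that grows a frontier set of reachable (used mask, exposed end) states layer by layer and returns the last non-empty layer's size.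
import Mathlib
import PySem

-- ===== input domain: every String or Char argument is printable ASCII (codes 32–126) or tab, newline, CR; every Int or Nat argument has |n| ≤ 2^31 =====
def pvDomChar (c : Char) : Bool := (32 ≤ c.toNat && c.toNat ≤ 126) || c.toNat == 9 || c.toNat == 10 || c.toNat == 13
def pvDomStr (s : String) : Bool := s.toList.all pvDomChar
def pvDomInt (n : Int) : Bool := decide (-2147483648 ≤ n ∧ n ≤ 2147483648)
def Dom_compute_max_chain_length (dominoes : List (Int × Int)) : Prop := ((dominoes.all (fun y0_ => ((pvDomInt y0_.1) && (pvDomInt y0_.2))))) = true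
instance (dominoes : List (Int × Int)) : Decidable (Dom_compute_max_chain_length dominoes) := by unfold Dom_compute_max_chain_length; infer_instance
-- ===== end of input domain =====

-- B replaces A's memoized backtracking by a bottom-up BFS over (mask, exposed-end) states (alternative decomposition, same result).


-- ===== PORT A =====
-- dfs(current, used) of A; `fuel` only bounds the recursion depth (each call sets a
-- fresh bit of `used`, so fuel = n+1 at the top is never exhausted).
def dfsA (ds : List (Int × Int)) : Option Int → Nat → Nat → Int
  | _, _, 0 => 0
  | current, used, fuel+1 =>
    (List.range ds.length).foldl (fun best i =>
      if used.testBit i then best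
      else
        let p := ds.getD i (0, 0)
        let best1 := if current = none ∨ current = some p.1
          then max best (1 + dfsA ds (some p.2) (used ||| 2^i) fuel) else best
        if (current = none ∨ current = some p.2) ∧ p.1 ≠ p.2
          then max best1 (1 + dfsA ds (some p.1) (used ||| 2^i) fuel) else best1) 0

def compute_max_chain_length (dominoes : List (Int × Int)) : Int :=
  dfsA dominoes none 0 (dominoes.length + 1)

-- ===== PORT B =====
-- inner `for j in range(n)` loop of Source B, extending one state into the next frontier
def bStep (ds : List (Int × Int)) (st : Nat × Int) (nxt : List (Nat × Int)) : List (Nat × Int) :=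
  (List.range ds.length).foldl (fun nxt j =>
    if st.1.testBit j then nxt
    else
      let p := ds.getD j (0, 0)
      let nxt1 := if p.1 = st.2 then PySem.Set.add nxt (st.1 ||| 2^j, p.2) else nxt
      if p.2 = st.2 then PySem.Set.add nxt1 (st.1 ||| 2^j, p.1) else nxt1) nxt

-- one iteration of the while-loop body: the next frontier set
def bFrontier (ds : List (Int × Int)) (fr : List (Nat × Int)) : List (Nat × Int) :=
  fr.foldl (fun nxt st => bStep ds st nxt) []

-- the seeding loop: every single domino, both orientations
def bSeeds (ds : List (Int × Int)) : List (Nat × Int) :=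
  (List.range ds.length).foldl (fun s i =>
    let p := ds.getD i (0, 0)
    PySem.Set.add (PySem.Set.add s (2^i, p.2)) (2^i, p.1)) []

-- the while-loop; `fuel` only bounds the iteration count (frontier masks grow
-- strictly, so the loop empties long before 2^n+1 iterations)
def bLoop (ds : List (Int × Int)) : List (Nat × Int) → Int → Int → Nat → Int
  | _, best, _, 0 => best
  | fr, best, k, fuel+1 => if fr.isEmpty then best else bLoop ds (bFrontier ds fr) k (k+1) fuel

def compute_max_chain_length_alt (dominoes : List (Int × Int)) : Int :=
  bLoop dominoes (bSeeds dominoes) 0 1 (2 ^ dominoes.length + 1)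

-- ===== PRECONDITION & SPEC =====
def Spec_compute_max_chain_length (dominoes : List (Int × Int)) (out : Int) : Prop := out = compute_max_chain_length_alt dominoes
instance (dominoes : List (Int × Int)) (out : Int) : Decidable (Spec_compute_max_chain_length dominoes out) := by unfold Spec_compute_max_chain_length; infer_instance

-- ===== CLAIM (what is proved, stated in full; the proofs are below) =====
def Claim_equal_compute_max_chain_length : Prop := ∀ (dominoes : List (Int × Int)), Dom_compute_max_chain_length dominoes → Spec_compute_max_chain_length dominoes (compute_max_chain_length dominoes)

-- ===== LEMMAS AND PROOFS =====

-- One chain transition: append unused domino j (in some orientation) to exposed end e.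
def TransP (ds : List (Int × Int)) (e : Int) (m : Nat) (e' : Int) (m' : Nat) : Prop :=
  ∃ j, j < ds.length ∧ m.testBit j = false ∧ m' = m ||| 2^j ∧
    (((ds.getD j (0, 0)).1 = e ∧ e' = (ds.getD j (0, 0)).2) ∨
     ((ds.getD j (0, 0)).2 = e ∧ e' = (ds.getD j (0, 0)).1))

-- t transitions from state (e, m) ending in state (e', m').
inductive ExtTo (ds : List (Int × Int)) : Int → Nat → Nat → Int → Nat → Prop
  | nil (e : Int) (m : Nat) : ExtTo ds e m 0 e m
  | step {e : Int} {m : Nat} {e1 : Int} {m1 : Nat} {t : Nat} {e' : Int} {m' : Nat} :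
      TransP ds e m e1 m1 → ExtTo ds e1 m1 t e' m' → ExtTo ds e m (t+1) e' m'

-- a valid k-domino chain exists with used-mask m and exposed end e
def StP (ds : List (Int × Int)) (m : Nat) (e : Int) (k : Nat) : Prop :=
  ∃ i, i < ds.length ∧ ∃ e0, (e0 = (ds.getD i (0, 0)).2 ∨ e0 = (ds.getD i (0, 0)).1) ∧
    ∃ t, k = t + 1 ∧ ExtTo ds e0 (2^i) t e m

-- "r is the maximum chain length": what both programs return
def TopOk (ds : List (Int × Int)) (r : Int) : Prop :=
  0 ≤ r ∧ (r = 0 ∨ ∃ m e, StP ds m e r.toNat) ∧ ∀ k m e, StP ds m e k → (k : Int) ≤ r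

-- "r is the maximum number of dominoes appendable from state (e, m)"
def DfsOk (ds : List (Int × Int)) (e : Int) (m : Nat) (r : Int) : Prop :=
  (∃ t e' m', ExtTo ds e m t e' m' ∧ r = (t : Int)) ∧
    ∀ t e' m', ExtTo ds e m t e' m' → (t : Int) ≤ r

lemma TopOk_unique {ds : List (Int × Int)} {v w : Int} (hv : TopOk ds v) (hw : TopOk ds w) : v = w := by
  obtain ⟨hv0, hvr, hvu⟩ := hv
  obtain ⟨hw0, hwr, hwu⟩ := hw
  have h1 : v ≤ w := by
    rcases hvr with h | ⟨m, e, st⟩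
    · omega
    · have := hwu _ _ _ st
      rwa [Int.toNat_of_nonneg hv0] at this
  have h2 : w ≤ v := by
    rcases hwr with h | ⟨m, e, st⟩
    · omega
    · have := hvu _ _ _ st
      rwa [Int.toNat_of_nonneg hw0] at this
  omega

-- ---- mask arithmetic ----
lemma lt_or_fresh {m : Nat} {j : Nat} (h : m.testBit j = false) : m < m ||| 2^j := by
  apply Nat.lt_of_testBit j h
  · simp [Nat.testBit_or]
  · intro k hk
    simp [Nat.testBit_or, Nat.testBit_two_pow]
    omega

lemma ExtTo_mask {ds : List (Int × Int)} {e : Int} {m : Nat} {t : Nat} {e' : Int} {m' : Nat}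
    (h : ExtTo ds e m t e' m') : m + t ≤ m' ∧ (m < 2 ^ ds.length → m' < 2 ^ ds.length) := by
  induction h with
  | nil e m => omega
  | step htr _ ih =>
    obtain ⟨j, hj, hb, hm1, _⟩ := htr
    subst hm1
    have hlt := lt_or_fresh hb
    refine ⟨by omega, fun hm => ih.2 ?_⟩
    have h2j : 2 ^ j < 2 ^ ds.length := Nat.pow_lt_pow_right one_lt_two hj
    exact Nat.or_lt_two_pow hm h2j

lemma StP_le {ds : List (Int × Int)} {m : Nat} {e : Int} {k : Nat} (h : StP ds m e k) :
    k ≤ 2 ^ ds.length := by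
  obtain ⟨i, hi, e0, _, t, hk, hext⟩ := h
  have hmask := ExtTo_mask hext
  have h2i : 2 ^ i < 2 ^ ds.length := Nat.pow_lt_pow_right one_lt_two hi
  have hpos : 0 < 2 ^ i := Nat.two_pow_pos i
  have := hmask.2 h2i
  omega

-- ---- snoc / unsnoc of chains ----
lemma ExtTo_snoc {ds : List (Int × Int)} {e : Int} {m : Nat} {t : Nat} {e1 : Int} {m1 : Nat}
    {e' : Int} {m' : Nat} (h : ExtTo ds e m t e1 m1) (h2 : TransP ds e1 m1 e' m') :
    ExtTo ds e m (t+1) e' m' := by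
  revert h2
  induction h with
  | nil e m => intro h2; exact ExtTo.step h2 (ExtTo.nil _ _)
  | step htr _ ih => intro h2; exact ExtTo.step htr (ih h2)

lemma ExtTo_zero {ds : List (Int × Int)} {e : Int} {m : Nat} {e' : Int} {m' : Nat}
    (h : ExtTo ds e m 0 e' m') : e' = e ∧ m' = m := by
  cases h
  exact ⟨rfl, rfl⟩

lemma ExtTo_unsnoc {ds : List (Int × Int)} {e : Int} {m : Nat} {t : Nat} {e' : Int} {m' : Nat}
    (h : ExtTo ds e m t e' m') (ht : 0 < t) :
    ∃ e1 m1, ExtTo ds e m (t-1) e1 m1 ∧ TransP ds e1 m1 e' m' := by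
  revert ht
  induction h with
  | nil e m => intro ht; exact absurd ht (by omega)
  | @step e m e1 m1 t e' m' htr hext ih =>
    intro _
    cases t with
    | zero =>
      obtain ⟨he, hm⟩ := ExtTo_zero hext
      refine ⟨e, m, ExtTo.nil _ _, ?_⟩
      rw [he, hm]
      exact htr
    | succ t2 =>
      obtain ⟨e2, m2, hext2, htr2⟩ := ih (by omega)
      refine ⟨e2, m2, ?_, htr2⟩
      have h3 : t2 + 1 + 1 - 1 = (t2 + 1 - 1) + 1 := by omega
      rw [h3]
      exact ExtTo.step htr hext2

lemma StP_snoc {ds : List (Int × Int)} {m : Nat} {e : Int} {k : Nat} {e' : Int} {m' : Nat}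
    (h : StP ds m e k) (h2 : TransP ds e m e' m') : StP ds m' e' (k+1) := by
  obtain ⟨i, hi, e0, he0, t, hk, hext⟩ := h
  exact ⟨i, hi, e0, he0, t + 1, by omega, ExtTo_snoc hext h2⟩

lemma StP_unsnoc {ds : List (Int × Int)} {m' : Nat} {e' : Int} {k : Nat}
    (h : StP ds m' e' k) (hk : 2 ≤ k) :
    ∃ m e, StP ds m e (k-1) ∧ TransP ds e m e' m' := by
  obtain ⟨i, hi, e0, he0, t, hkt, hext⟩ := h
  have ht : 0 < t := by omega
  obtain ⟨e1, m1, hext1, htr⟩ := ExtTo_unsnoc hext ht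
  exact ⟨m1, e1, ⟨i, hi, e0, he0, t - 1, by omega, hext1⟩, htr⟩

lemma StP_down {ds : List (Int × Int)} {k j : Nat} (hj1 : 1 ≤ j) (hjk : j ≤ k) :
    (∃ m e, StP ds m e k) → ∃ m e, StP ds m e j := by
  have H : ∀ d : Nat, (∃ m e, StP ds m e (j + d)) → ∃ m e, StP ds m e j := by
    intro d
    induction d with
    | zero => simp
    | succ d ih =>
      rintro ⟨m, e, h⟩
      obtain ⟨m2, e2, h2, -⟩ := StP_unsnoc h (by omega)
      have h4 : j + (d + 1) - 1 = j + d := by omega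
      rw [h4] at h2
      exact ih ⟨m2, e2, h2⟩
  intro h
  have hk : k = j + (k - j) := by omega
  rw [hk] at h
  exact H _ h

-- ---- the unused-index count (termination measure of A's dfs) ----
def UU (ds : List (Int × Int)) (m : Nat) : Finset Nat :=
  (Finset.range ds.length).filter (fun i => m.testBit i = false)

lemma UU_or {ds : List (Int × Int)} {m : Nat} {j : Nat} (_hj : j < ds.length)
    (_hb : m.testBit j = false) : UU ds (m ||| 2^j) = (UU ds m).erase j := by
  ext i
  simp only [UU, Finset.mem_filter, Finset.mem_erase, Finset.mem_range, Nat.testBit_or,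
    Nat.testBit_two_pow, Bool.or_eq_false_iff, decide_eq_false_iff_not]
  constructor
  · rintro ⟨h1, h2, h3⟩
    exact ⟨fun h => h3 h.symm, h1, h2⟩
  · rintro ⟨h1, h2, h3⟩
    exact ⟨h2, h3, fun h => h1 h.symm⟩

lemma UU_card_or {ds : List (Int × Int)} {m : Nat} {j : Nat} (hj : j < ds.length)
    (hb : m.testBit j = false) : (UU ds (m ||| 2^j)).card + 1 = (UU ds m).card := by
  have hmem : j ∈ UU ds m := by simp [UU, hj, hb]
  rw [UU_or hj hb, Finset.card_erase_of_mem hmem]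
  have := Finset.card_pos.mpr ⟨j, hmem⟩
  omega

-- ---- generic fold lemmas for a running-max loop ----
lemma foldl_mono_le {g : Int → Nat → Int} (hmono : ∀ a i, a ≤ g a i) :
    ∀ (l : List Nat) (acc : Int), acc ≤ l.foldl g acc := by
  intro l
  induction l with
  | nil => intro acc; exact le_rfl
  | cons x l ih => intro acc; exact le_trans (hmono acc x) (ih _)

lemma foldl_mono_ge {g : Int → Nat → Int} (hmono : ∀ a i, a ≤ g a i)
    {i : Nat} {c : Int} (hc : ∀ a, c ≤ g a i) :
    ∀ (l : List Nat) (acc : Int), i ∈ l → c ≤ l.foldl g acc := by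
  intro l
  induction l with
  | nil => intro acc h; exact absurd h (List.not_mem_nil)
  | cons x l ih =>
    intro acc h
    rcases List.mem_cons.mp h with h | h
    · subst h
      exact le_trans (hc acc) (foldl_mono_le hmono l _)
    · exact ih _ h

lemma foldl_cases {g : Int → Nat → Int} {C : Nat → Int → Prop}
    (hcase : ∀ a i, g a i = a ∨ C i (g a i)) :
    ∀ (l : List Nat) (acc : Int), l.foldl g acc = acc ∨ ∃ i ∈ l, C i (l.foldl g acc) := by
  intro l
  induction l with
  | nil => intro acc; exact Or.inl rfl
  | cons x l ih =>
    intro acc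
    rw [List.foldl_cons]
    rcases ih (g acc x) with h | ⟨i, hmem, hC⟩
    · rw [h]
      rcases hcase acc x with h2 | h2
      · exact Or.inl h2
      · exact Or.inr ⟨x, List.mem_cons_self, h2⟩
    · exact Or.inr ⟨i, List.mem_cons_of_mem _ hmem, hC⟩

-- ---- A's dfs loop body, named (zeta-reduced form of the body in dfsA) ----
def gA (ds : List (Int × Int)) (cur : Option Int) (used : Nat) (fuel : Nat) : Int → Nat → Int :=
  fun best i =>
    if used.testBit i then best
    else
      if (cur = none ∨ cur = some (ds.getD i (0, 0)).2) ∧ (ds.getD i (0, 0)).1 ≠ (ds.getD i (0, 0)).2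
      then max (if cur = none ∨ cur = some (ds.getD i (0, 0)).1
                then max best (1 + dfsA ds (some (ds.getD i (0, 0)).2) (used ||| 2^i) fuel) else best)
               (1 + dfsA ds (some (ds.getD i (0, 0)).1) (used ||| 2^i) fuel)
      else (if cur = none ∨ cur = some (ds.getD i (0, 0)).1
            then max best (1 + dfsA ds (some (ds.getD i (0, 0)).2) (used ||| 2^i) fuel) else best)

lemma dfsA_succ (ds : List (Int × Int)) (cur : Option Int) (used : Nat) (fuel : Nat) :
    dfsA ds cur used (fuel+1) = (List.range ds.length).foldl (gA ds cur used fuel) 0 := by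
  rw [dfsA]
  rfl

def CA (ds : List (Int × Int)) (cur : Option Int) (used : Nat) (fuel : Nat) (i : Nat) (v : Int) : Prop :=
  used.testBit i = false ∧
  (((cur = none ∨ cur = some (ds.getD i (0, 0)).1) ∧
      v = 1 + dfsA ds (some (ds.getD i (0, 0)).2) (used ||| 2^i) fuel) ∨
   (((cur = none ∨ cur = some (ds.getD i (0, 0)).2) ∧ (ds.getD i (0, 0)).1 ≠ (ds.getD i (0, 0)).2) ∧
      v = 1 + dfsA ds (some (ds.getD i (0, 0)).1) (used ||| 2^i) fuel))

lemma gA_mono (ds : List (Int × Int)) (cur : Option Int) (used : Nat) (fuel : Nat) :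
    ∀ a i, a ≤ gA ds cur used fuel a i := by
  intro a i
  simp only [gA]
  by_cases h0 : used.testBit i = true
  · rw [if_pos h0]
  · rw [if_neg h0]
    by_cases h2 : (cur = none ∨ cur = some (ds.getD i (0, 0)).2) ∧ (ds.getD i (0, 0)).1 ≠ (ds.getD i (0, 0)).2
    · rw [if_pos h2]
      by_cases h1 : cur = none ∨ cur = some (ds.getD i (0, 0)).1
      · rw [if_pos h1]; exact le_trans (le_max_left _ _) (le_max_left _ _)
      · rw [if_neg h1]; exact le_max_left _ _
    · rw [if_neg h2]
      by_cases h1 : cur = none ∨ cur = some (ds.getD i (0, 0)).1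
      · rw [if_pos h1]; exact le_max_left _ _
      · rw [if_neg h1]

lemma gA_case (ds : List (Int × Int)) (cur : Option Int) (used : Nat) (fuel : Nat) :
    ∀ a i, gA ds cur used fuel a i = a ∨ CA ds cur used fuel i (gA ds cur used fuel a i) := by
  intro a i
  simp only [gA, CA]
  by_cases h0 : used.testBit i = true
  · rw [if_pos h0]; exact Or.inl rfl
  · rw [if_neg h0]
    have h0' : used.testBit i = false := by simpa using h0
    by_cases h2 : (cur = none ∨ cur = some (ds.getD i (0, 0)).2) ∧ (ds.getD i (0, 0)).1 ≠ (ds.getD i (0, 0)).2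
    · rw [if_pos h2]
      by_cases h1 : cur = none ∨ cur = some (ds.getD i (0, 0)).1
      · rw [if_pos h1]
        rcases max_choice (max a (1 + dfsA ds (some (ds.getD i (0, 0)).2) (used ||| 2^i) fuel))
            (1 + dfsA ds (some (ds.getD i (0, 0)).1) (used ||| 2^i) fuel) with h | h
        · rw [h]
          rcases max_choice a (1 + dfsA ds (some (ds.getD i (0, 0)).2) (used ||| 2^i) fuel) with h' | h'
          · exact Or.inl h'
          · exact Or.inr ⟨h0', Or.inl ⟨h1, h'⟩⟩
        · rw [h]
          exact Or.inr ⟨h0', Or.inr ⟨h2, rfl⟩⟩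
      · rw [if_neg h1]
        rcases max_choice a (1 + dfsA ds (some (ds.getD i (0, 0)).1) (used ||| 2^i) fuel) with h | h
        · exact Or.inl h
        · exact Or.inr ⟨h0', Or.inr ⟨h2, h⟩⟩
    · rw [if_neg h2]
      by_cases h1 : cur = none ∨ cur = some (ds.getD i (0, 0)).1
      · rw [if_pos h1]
        rcases max_choice a (1 + dfsA ds (some (ds.getD i (0, 0)).2) (used ||| 2^i) fuel) with h | h
        · exact Or.inl h
        · exact Or.inr ⟨h0', Or.inl ⟨h1, h⟩⟩
      · rw [if_neg h1]; exact Or.inl rfl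

lemma gA_ge1 (ds : List (Int × Int)) (cur : Option Int) (used : Nat) (fuel : Nat) {i : Nat}
    (hb : used.testBit i = false) (hc : cur = none ∨ cur = some (ds.getD i (0, 0)).1) :
    ∀ a, 1 + dfsA ds (some (ds.getD i (0, 0)).2) (used ||| 2^i) fuel ≤ gA ds cur used fuel a i := by
  intro a
  simp only [gA]
  rw [if_neg (show ¬ used.testBit i = true by simp [hb])]
  by_cases h2 : (cur = none ∨ cur = some (ds.getD i (0, 0)).2) ∧ (ds.getD i (0, 0)).1 ≠ (ds.getD i (0, 0)).2
  · rw [if_pos h2, if_pos hc]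
    exact le_trans (le_max_right _ _) (le_max_left _ _)
  · rw [if_neg h2, if_pos hc]
    exact le_max_right _ _

lemma gA_ge2 (ds : List (Int × Int)) (cur : Option Int) (used : Nat) (fuel : Nat) {i : Nat}
    (hb : used.testBit i = false)
    (hc : (cur = none ∨ cur = some (ds.getD i (0, 0)).2) ∧ (ds.getD i (0, 0)).1 ≠ (ds.getD i (0, 0)).2) :
    ∀ a, 1 + dfsA ds (some (ds.getD i (0, 0)).1) (used ||| 2^i) fuel ≤ gA ds cur used fuel a i := by
  intro a
  simp only [gA]
  rw [if_neg (show ¬ used.testBit i = true by simp [hb]), if_pos hc]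
  exact le_max_right _ _

-- ---- A's dfs is correct ----
lemma dfsA_ok (ds : List (Int × Int)) :
    ∀ (fuel : Nat) (used : Nat) (e : Int), (UU ds used).card < fuel →
      DfsOk ds e used (dfsA ds (some e) used fuel) := by
  intro fuel
  induction fuel with
  | zero => intro used e h; exact absurd h (by omega)
  | succ fuel ih =>
    intro used e hcard
    rw [dfsA_succ]
    constructor
    · -- realizability
      rcases foldl_cases (gA_case ds (some e) used fuel) (List.range ds.length) 0 with h0 | ⟨i, hmem, hC⟩
      · exact ⟨0, e, used, ExtTo.nil _ _, by rw [h0]; rfl⟩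
      · have hi : i < ds.length := List.mem_range.mp hmem
        obtain ⟨hbit, hC'⟩ := hC
        have hcard2 : (UU ds (used ||| 2^i)).card < fuel := by
          have := UU_card_or hi hbit; omega
        rcases hC' with ⟨hc1, hv⟩ | ⟨⟨hc2, hab⟩, hv⟩
        · obtain ⟨t, e'', m'', hext, hr⟩ := (ih (used ||| 2^i) (ds.getD i (0, 0)).2 hcard2).1
          have ha : (ds.getD i (0, 0)).1 = e := by
            rcases hc1 with h | h
            · exact absurd h (by simp)
            · exact (Option.some.inj h).symm
          refine ⟨t + 1, e'', m'', ExtTo.step ⟨i, hi, hbit, rfl, Or.inl ⟨ha, rfl⟩⟩ hext, ?_⟩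
          rw [hv, hr]; push_cast; ring
        · obtain ⟨t, e'', m'', hext, hr⟩ := (ih (used ||| 2^i) (ds.getD i (0, 0)).1 hcard2).1
          have hbe : (ds.getD i (0, 0)).2 = e := by
            rcases hc2 with h | h
            · exact absurd h (by simp)
            · exact (Option.some.inj h).symm
          refine ⟨t + 1, e'', m'', ExtTo.step ⟨i, hi, hbit, rfl, Or.inr ⟨hbe, rfl⟩⟩ hext, ?_⟩
          rw [hv, hr]; push_cast; ring
    · -- upper bound
      intro t e' m' hext
      cases hext with
      | nil =>
        simpa using foldl_mono_le (gA_mono ds (some e) used fuel) (List.range ds.length) 0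
      | @step _ _ e1 m1 t' _ _ htr hrest =>
        obtain ⟨j, hj, hb, hm1, hor⟩ := htr
        subst hm1
        have hcard2 : (UU ds (used ||| 2^j)).card < fuel := by
          have := UU_card_or hj hb; omega
        rcases hor with ⟨ha, he1⟩ | ⟨hbe, he1⟩
        · subst he1
          have hup := (ih (used ||| 2^j) (ds.getD j (0, 0)).2 hcard2).2 t' e' m' hrest
          have hge := gA_ge1 ds (some e) used fuel hb (Or.inr (by rw [ha]))
          have hfold := foldl_mono_ge (gA_mono ds (some e) used fuel) hge (List.range ds.length) 0
            (List.mem_range.mpr hj)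
          push_cast
          omega
        · subst he1
          by_cases hab : (ds.getD j (0, 0)).1 = (ds.getD j (0, 0)).2
          · rw [hab] at hrest
            have hup := (ih (used ||| 2^j) (ds.getD j (0, 0)).2 hcard2).2 t' e' m' hrest
            have hge := gA_ge1 ds (some e) used fuel hb (Or.inr (by rw [hab, hbe]))
            have hfold := foldl_mono_ge (gA_mono ds (some e) used fuel) hge (List.range ds.length) 0
              (List.mem_range.mpr hj)
            push_cast
            omega
          · have hup := (ih (used ||| 2^j) (ds.getD j (0, 0)).1 hcard2).2 t' e' m' hrest
            have hge := gA_ge2 ds (some e) used fuel hb ⟨Or.inr (by rw [hbe]), hab⟩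
            have hfold := foldl_mono_ge (gA_mono ds (some e) used fuel) hge (List.range ds.length) 0
              (List.mem_range.mpr hj)
            push_cast
            omega

lemma UU_zero_card (ds : List (Int × Int)) : (UU ds 0).card = ds.length := by
  simp [UU, Nat.zero_testBit]

lemma dfsA_top (ds : List (Int × Int)) : TopOk ds (dfsA ds none 0 (ds.length + 1)) := by
  rw [dfsA_succ]
  have hcard2 : ∀ i, i < ds.length → (UU ds (0 ||| 2^i)).card < ds.length := by
    intro i hi
    have := UU_card_or hi (Nat.zero_testBit i)
    have := UU_zero_card ds
    omega
  refine ⟨?_, ?_, ?_⟩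
  · simpa using foldl_mono_le (gA_mono ds none 0 ds.length) (List.range ds.length) 0
  · rcases foldl_cases (gA_case ds none 0 ds.length) (List.range ds.length) 0 with h0 | ⟨i, hmem, hC⟩
    · exact Or.inl (by rw [h0])
    · have hi : i < ds.length := List.mem_range.mp hmem
      obtain ⟨-, hC'⟩ := hC
      right
      rcases hC' with ⟨-, hv⟩ | ⟨⟨-, -⟩, hv⟩
      · obtain ⟨t, e'', m'', hext, hr⟩ := (dfsA_ok ds ds.length (0 ||| 2^i) (ds.getD i (0, 0)).2 (hcard2 i hi)).1
        rw [Nat.zero_or] at hext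
        refine ⟨m'', e'', i, hi, (ds.getD i (0, 0)).2, Or.inl rfl, t, ?_, hext⟩
        omega
      · obtain ⟨t, e'', m'', hext, hr⟩ := (dfsA_ok ds ds.length (0 ||| 2^i) (ds.getD i (0, 0)).1 (hcard2 i hi)).1
        rw [Nat.zero_or] at hext
        refine ⟨m'', e'', i, hi, (ds.getD i (0, 0)).1, Or.inr rfl, t, ?_, hext⟩
        omega
  · intro k m e hst
    obtain ⟨i, hi, e0, he0, t, hk, hext⟩ := hst
    rw [show (2:Nat)^i = 0 ||| 2^i from (Nat.zero_or _).symm] at hext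
    rcases he0 with he0 | he0
    · subst he0
      have hup := (dfsA_ok ds ds.length (0 ||| 2^i) (ds.getD i (0, 0)).2 (hcard2 i hi)).2 t e m hext
      have hge := gA_ge1 ds none 0 ds.length (Nat.zero_testBit i) (Or.inl rfl)
      have hfold := foldl_mono_ge (gA_mono ds none 0 ds.length) hge (List.range ds.length) 0
        (List.mem_range.mpr hi)
      omega
    · subst he0
      by_cases hab : (ds.getD i (0, 0)).1 = (ds.getD i (0, 0)).2
      · rw [hab] at hext
        have hup := (dfsA_ok ds ds.length (0 ||| 2^i) (ds.getD i (0, 0)).2 (hcard2 i hi)).2 t e m hext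
        have hge := gA_ge1 ds none 0 ds.length (Nat.zero_testBit i) (Or.inl rfl)
        have hfold := foldl_mono_ge (gA_mono ds none 0 ds.length) hge (List.range ds.length) 0
          (List.mem_range.mpr hi)
        omega
      · have hup := (dfsA_ok ds ds.length (0 ||| 2^i) (ds.getD i (0, 0)).1 (hcard2 i hi)).2 t e m hext
        have hge := gA_ge2 ds none 0 ds.length (Nat.zero_testBit i) ⟨Or.inl rfl, hab⟩
        have hfold := foldl_mono_ge (gA_mono ds none 0 ds.length) hge (List.range ds.length) 0
          (List.mem_range.mpr hi)
        omega

-- ---- B's loop bodies, named (zeta-reduced forms) ----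
def gS (ds : List (Int × Int)) : List (Nat × Int) → Nat → List (Nat × Int) :=
  fun s i => PySem.Set.add (PySem.Set.add s (2^i, (ds.getD i (0, 0)).2)) (2^i, (ds.getD i (0, 0)).1)

def gB (ds : List (Int × Int)) (st : Nat × Int) : List (Nat × Int) → Nat → List (Nat × Int) :=
  fun nxt j =>
    if st.1.testBit j then nxt
    else
      if (ds.getD j (0, 0)).2 = st.2
      then PySem.Set.add (if (ds.getD j (0, 0)).1 = st.2
              then PySem.Set.add nxt (st.1 ||| 2^j, (ds.getD j (0, 0)).2) else nxt)
            (st.1 ||| 2^j, (ds.getD j (0, 0)).1)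
      else (if (ds.getD j (0, 0)).1 = st.2
            then PySem.Set.add nxt (st.1 ||| 2^j, (ds.getD j (0, 0)).2) else nxt)

lemma bSeeds_eq (ds : List (Int × Int)) : bSeeds ds = (List.range ds.length).foldl (gS ds) [] := rfl

lemma bStep_eq (ds : List (Int × Int)) (st : Nat × Int) (nxt : List (Nat × Int)) :
    bStep ds st nxt = (List.range ds.length).foldl (gB ds st) nxt := rfl

lemma mem_gS {ds : List (Int × Int)} (s : List (Nat × Int)) (i : Nat) (p : Nat × Int) :
    p ∈ gS ds s i ↔ p ∈ s ∨ p.1 = 2^i ∧ (p.2 = (ds.getD i (0, 0)).2 ∨ p.2 = (ds.getD i (0, 0)).1) := by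
  simp only [gS]
  rw [PySem.Set.mem_add, PySem.Set.mem_add]
  constructor
  · rintro ((hs | hp) | hp)
    · exact Or.inl hs
    · exact Or.inr ⟨by rw [hp], Or.inl (by rw [hp])⟩
    · exact Or.inr ⟨by rw [hp], Or.inr (by rw [hp])⟩
  · rintro (hs | ⟨h1, (h2 | h2)⟩)
    · exact Or.inl (Or.inl hs)
    · exact Or.inl (Or.inr (Prod.ext_iff.mpr ⟨h1, h2⟩))
    · exact Or.inr (Prod.ext_iff.mpr ⟨h1, h2⟩)

lemma mem_bSeeds {ds : List (Int × Int)} (p : Nat × Int) :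
    p ∈ bSeeds ds ↔ ∃ i, i < ds.length ∧ p.1 = 2^i ∧
      (p.2 = (ds.getD i (0, 0)).2 ∨ p.2 = (ds.getD i (0, 0)).1) := by
  have H : ∀ (N : Nat) (s : List (Nat × Int)),
      p ∈ (List.range N).foldl (gS ds) s ↔
      p ∈ s ∨ ∃ i, i < N ∧ p.1 = 2^i ∧
        (p.2 = (ds.getD i (0, 0)).2 ∨ p.2 = (ds.getD i (0, 0)).1) := by
    intro N
    induction N with
    | zero => intro s; simp
    | succ N ihN =>
      intro s
      rw [List.range_succ, List.foldl_append, List.foldl_cons, List.foldl_nil, mem_gS, ihN]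
      constructor
      · rintro ((hs | ⟨i, hi, h1, h2⟩) | ⟨h1, h2⟩)
        · exact Or.inl hs
        · exact Or.inr ⟨i, by omega, h1, h2⟩
        · exact Or.inr ⟨N, by omega, h1, h2⟩
      · rintro (hs | ⟨i, hi, h1, h2⟩)
        · exact Or.inl (Or.inl hs)
        · rcases Nat.lt_succ_iff_lt_or_eq.mp hi with hi' | rfl
          · exact Or.inl (Or.inr ⟨i, hi', h1, h2⟩)
          · exact Or.inr ⟨h1, h2⟩
  rw [bSeeds_eq, H]
  simp

lemma bSeeds_StP {ds : List (Int × Int)} (p : Nat × Int) :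
    p ∈ bSeeds ds ↔ StP ds p.1 p.2 1 := by
  rw [mem_bSeeds]
  constructor
  · rintro ⟨i, hi, h1, h2⟩
    refine ⟨i, hi, p.2, h2, 0, rfl, ?_⟩
    rw [h1]
    exact ExtTo.nil _ _
  · rintro ⟨i, hi, e0, he0, t, ht, hext⟩
    have ht0 : t = 0 := by omega
    subst ht0
    obtain ⟨he, hm⟩ := ExtTo_zero hext
    exact ⟨i, hi, hm, he ▸ he0⟩

lemma mem_gB {ds : List (Int × Int)} (st : Nat × Int) (x : List (Nat × Int)) (N : Nat) (p : Nat × Int) :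
    p ∈ gB ds st x N ↔ p ∈ x ∨ (st.1.testBit N = false ∧ p.1 = st.1 ||| 2^N ∧
      (((ds.getD N (0, 0)).1 = st.2 ∧ p.2 = (ds.getD N (0, 0)).2) ∨
       ((ds.getD N (0, 0)).2 = st.2 ∧ p.2 = (ds.getD N (0, 0)).1))) := by
  simp only [gB]
  by_cases h0 : st.1.testBit N = true
  · rw [if_pos h0]
    constructor
    · exact Or.inl
    · rintro (hx | ⟨hb, -⟩)
      · exact hx
      · exact absurd h0 (by simp [hb])
  · rw [if_neg h0]
    have h0' : st.1.testBit N = false := by simpa using h0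
    by_cases h2 : (ds.getD N (0, 0)).2 = st.2
    · rw [if_pos h2]
      by_cases h1 : (ds.getD N (0, 0)).1 = st.2
      · rw [if_pos h1, PySem.Set.mem_add, PySem.Set.mem_add]
        constructor
        · rintro ((hx | hp) | hp)
          · exact Or.inl hx
          · exact Or.inr ⟨h0', by rw [hp], Or.inl ⟨h1, by rw [hp]⟩⟩
          · exact Or.inr ⟨h0', by rw [hp], Or.inr ⟨h2, by rw [hp]⟩⟩
        · rintro (hx | ⟨-, h5, (⟨-, h6⟩ | ⟨-, h6⟩)⟩)
          · exact Or.inl (Or.inl hx)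
          · exact Or.inl (Or.inr (Prod.ext_iff.mpr ⟨h5, h6⟩))
          · exact Or.inr (Prod.ext_iff.mpr ⟨h5, h6⟩)
      · rw [if_neg h1, PySem.Set.mem_add]
        constructor
        · rintro (hx | hp)
          · exact Or.inl hx
          · exact Or.inr ⟨h0', by rw [hp], Or.inr ⟨h2, by rw [hp]⟩⟩
        · rintro (hx | ⟨-, h5, (⟨h6, -⟩ | ⟨-, h6⟩)⟩)
          · exact Or.inl hx
          · exact absurd h6 h1
          · exact Or.inr (Prod.ext_iff.mpr ⟨h5, h6⟩)
    · rw [if_neg h2]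
      by_cases h1 : (ds.getD N (0, 0)).1 = st.2
      · rw [if_pos h1, PySem.Set.mem_add]
        constructor
        · rintro (hx | hp)
          · exact Or.inl hx
          · exact Or.inr ⟨h0', by rw [hp], Or.inl ⟨h1, by rw [hp]⟩⟩
        · rintro (hx | ⟨-, h5, (⟨-, h6⟩ | ⟨h6, -⟩)⟩)
          · exact Or.inl hx
          · exact Or.inr (Prod.ext_iff.mpr ⟨h5, h6⟩)
          · exact absurd h6 h2
      · rw [if_neg h1]
        constructor
        · exact Or.inl
        · rintro (hx | ⟨-, -, (⟨h6, -⟩ | ⟨h6, -⟩)⟩)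
          · exact hx
          · exact absurd h6 h1
          · exact absurd h6 h2

lemma mem_bStep {ds : List (Int × Int)} (st : Nat × Int) (nxt : List (Nat × Int)) (p : Nat × Int) :
    p ∈ bStep ds st nxt ↔ p ∈ nxt ∨ TransP ds st.2 st.1 p.2 p.1 := by
  have H : ∀ (N : Nat) (s : List (Nat × Int)),
      p ∈ (List.range N).foldl (gB ds st) s ↔
      p ∈ s ∨ ∃ j, j < N ∧ st.1.testBit j = false ∧ p.1 = st.1 ||| 2^j ∧
        (((ds.getD j (0, 0)).1 = st.2 ∧ p.2 = (ds.getD j (0, 0)).2) ∨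
         ((ds.getD j (0, 0)).2 = st.2 ∧ p.2 = (ds.getD j (0, 0)).1)) := by
    intro N
    induction N with
    | zero => intro s; simp
    | succ N ihN =>
      intro s
      rw [List.range_succ, List.foldl_append, List.foldl_cons, List.foldl_nil, mem_gB, ihN]
      constructor
      · rintro ((hs | ⟨j, hj, hrest⟩) | ⟨hb, hrest⟩)
        · exact Or.inl hs
        · exact Or.inr ⟨j, by omega, hrest⟩
        · exact Or.inr ⟨N, by omega, hb, hrest⟩
      · rintro (hs | ⟨j, hj, hrest⟩)
        · exact Or.inl (Or.inl hs)
        · rcases Nat.lt_succ_iff_lt_or_eq.mp hj with hj' | rfl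
          · exact Or.inl (Or.inr ⟨j, hj', hrest⟩)
          · exact Or.inr hrest
  rw [bStep_eq, H]
  constructor
  · rintro (hs | ⟨j, hj, hrest⟩)
    · exact Or.inl hs
    · exact Or.inr ⟨j, hj, hrest⟩
  · rintro (hs | ⟨j, hj, hrest⟩)
    · exact Or.inl hs
    · exact Or.inr ⟨j, hj, hrest⟩

lemma mem_bFrontier {ds : List (Int × Int)} (fr : List (Nat × Int)) (p : Nat × Int) :
    p ∈ bFrontier ds fr ↔ ∃ st ∈ fr, TransP ds st.2 st.1 p.2 p.1 := by
  have H : ∀ (l : List (Nat × Int)) (acc : List (Nat × Int)),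
      p ∈ l.foldl (fun nxt st => bStep ds st nxt) acc ↔
      p ∈ acc ∨ ∃ st ∈ l, TransP ds st.2 st.1 p.2 p.1 := by
    intro l
    induction l with
    | nil => intro acc; simp
    | cons st l ih =>
      intro acc
      rw [List.foldl_cons, ih, mem_bStep]
      constructor
      · rintro ((hx | htr) | ⟨st', hmem, htr⟩)
        · exact Or.inl hx
        · exact Or.inr ⟨st, List.mem_cons_self, htr⟩
        · exact Or.inr ⟨st', List.mem_cons_of_mem _ hmem, htr⟩
      · rintro (hx | ⟨st', hmem, htr⟩)
        · exact Or.inl (Or.inl hx)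
        · rcases List.mem_cons.mp hmem with rfl | hmem'
          · exact Or.inl (Or.inr htr)
          · exact Or.inr ⟨st', hmem', htr⟩
  rw [bFrontier, H]
  simp

lemma bFrontier_inv {ds : List (Int × Int)} {fr : List (Nat × Int)} {k : Nat} (hk : 1 ≤ k)
    (h : ∀ p, p ∈ fr ↔ StP ds p.1 p.2 k) :
    ∀ p, p ∈ bFrontier ds fr ↔ StP ds p.1 p.2 (k+1) := by
  intro p
  rw [mem_bFrontier]
  constructor
  · rintro ⟨st, hmem, htr⟩
    exact StP_snoc ((h st).mp hmem) htr
  · intro hst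
    obtain ⟨m, e, hst', htr⟩ := StP_unsnoc hst (by omega)
    have h4 : k + 1 - 1 = k := by omega
    rw [h4] at hst'
    exact ⟨(m, e), (h (m, e)).mpr hst', htr⟩

lemma bLoop_ok (ds : List (Int × Int)) :
    ∀ (fuel : Nat) (fr : List (Nat × Int)) (kn : Nat), 1 ≤ kn →
      (∀ p, p ∈ fr ↔ StP ds p.1 p.2 kn) →
      (kn = 1 ∨ ∃ m e, StP ds m e (kn - 1)) →
      2 ^ ds.length + 2 ≤ fuel + kn →
      TopOk ds (bLoop ds fr ((kn : Int) - 1) (kn : Int) fuel) := by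
  intro fuel
  induction fuel with
  | zero =>
    intro fr kn hk1 hinv hreal hfuel
    rw [bLoop]
    refine ⟨by omega, ?_, ?_⟩
    · rcases hreal with rfl | ⟨m, e, hst⟩
      · exact Or.inl (by norm_num)
      · refine Or.inr ⟨m, e, ?_⟩
        have h4 : ((kn : Int) - 1).toNat = kn - 1 := by omega
        rw [h4]
        exact hst
    · intro k m e hst
      have := StP_le hst
      omega
  | succ fuel ih =>
    intro fr kn hk1 hinv hreal hfuel
    rw [bLoop]
    by_cases hemp : fr.isEmpty
    · rw [if_pos hemp]
      have hfr : fr = [] := List.isEmpty_iff.mp hemp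
      refine ⟨by omega, ?_, ?_⟩
      · rcases hreal with rfl | ⟨m, e, hst⟩
        · exact Or.inl (by norm_num)
        · refine Or.inr ⟨m, e, ?_⟩
          have h4 : ((kn : Int) - 1).toNat = kn - 1 := by omega
          rw [h4]
          exact hst
      · intro k m e hst
        by_cases hk : k < kn
        · omega
        · exfalso
          obtain ⟨m', e', hst'⟩ := StP_down hk1 (by omega) ⟨m, e, hst⟩
          have := (hinv (m', e')).mpr hst'
          rw [hfr] at this
          exact absurd this (List.not_mem_nil)
    · rw [if_neg hemp]
      have hne : fr ≠ [] := fun h => hemp (by rw [h]; rfl)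
      obtain ⟨x, hx⟩ := List.exists_mem_of_ne_nil fr hne
      have hreal' : ∃ m e, StP ds m e kn := ⟨x.1, x.2, (hinv x).mp hx⟩
      have h2 := ih (bFrontier ds fr) (kn + 1) (by omega) (bFrontier_inv hk1 hinv)
        (Or.inr (by simpa using hreal')) (by omega)
      have hc1 : ((kn + 1 : Nat) : Int) - 1 = (kn : Int) := by push_cast; ring
      have hc2 : ((kn + 1 : Nat) : Int) = (kn : Int) + 1 := by push_cast; ring
      rw [hc1, hc2] at h2
      exact h2

lemma alt_top (ds : List (Int × Int)) : TopOk ds (compute_max_chain_length_alt ds) := by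
  have h := bLoop_ok ds (2 ^ ds.length + 1) (bSeeds ds) 1 le_rfl
    (fun p => bSeeds_StP p) (Or.inl rfl) (by omega)
  norm_num at h
  unfold compute_max_chain_length_alt
  exact h

-- ===== VERDICT (by name: the statement is the Claim_ definition above) =====
theorem compute_max_chain_length_spec : Claim_equal_compute_max_chain_length := by
  intro ds _
  unfold Spec_compute_max_chain_length
  unfold compute_max_chain_length
  exact TopOk_unique (dfsA_top ds) (alt_top ds)
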